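-- pv_equiv track=rewrite | github.com/beesyst/secwebscan | plugins/nmap.py | format_script_output
-- ===== SOURCE A (Python) =====
-- from collections import Counter
--
-- def format_script_output(raw: str) -> str:
--     raw = raw.strip()
--     if raw == "-" or not raw:
--         return "-"
--
--     lines = [
--         line.strip()
--         for line in raw.splitlines()
--         if line.strip() and line.strip() != "-"
--     ]
--     unique_lines = list(dict.fromkeys(lines))  # Сохраняем порядок + убираем дубли
--
--     sections = []
--
--     if any("TLSv1." in l or "TLSv1.3" in l for l in unique_lines):
--         tls_lines = []
--         current_version = ""
--         for line in unique_lines: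
--             if "TLSv1." in line or "TLSv1.3" in line:
--                 current_version = line.strip().strip(":")
--                 tls_lines.append(f"\n{current_version}")
--             elif "TLS_" in line or "TLS_AKE_" in line:
--                 tls_lines.append(f"- {line.strip()}")
--         if tls_lines:
--             sections.append("[TLS Cipher Support]\n" + "\n".join(tls_lines))
--
--     if any("Subject:" in l or "Valid:" in l for l in unique_lines):
--         cert_block = ["[Cert Info]"]
--         for key in [
--             "Subject:",
--             "Subject Alternative Name",
--             "Issuer:",
--             "Public Key",
--             "Signature Algorithm",
--             "Not valid",
--             "MD5:",
--             "SHA-1:",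
--         ]:
--             cert_block.extend([line for line in unique_lines if key in line])
--         sections.append("\n".join(cert_block))
--
--     if any("FTP" in l or "Anonymous FTP login allowed" in l for l in unique_lines):
--         ftp_block = ["[FTP Info]"]
--         ftp_block.extend([line for line in unique_lines if "FTP" in line])
--         sections.append("\n".join(ftp_block))
--
--     if any("SSH" in l for l in unique_lines):
--         ssh_block = ["[SSH Info]"]
--         ssh_block.extend([line for line in unique_lines if "SSH" in line])
--         sections.append("\n".join(ssh_block))
--
--     if any("/nice ports" in l or "FourOhFourRequest" in l for l in unique_lines):
--         http_block = ["[HTTP Response Patterns]"]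
--         http_block.extend(
--             [
--                 f"- {line}"
--                 for line in unique_lines
--                 if any(k in line for k in ["FourOhFourRequest", "Request", "OPTIONS"])
--             ]
--         )
--         sections.append("\n".join(http_block))
--
--     if any("CVE-" in l or "vulnerab" in l.lower() for l in unique_lines):
--         vuln_lines = [
--             line
--             for line in unique_lines
--             if "CVE-" in line or "vulnerab" in line.lower()
--         ]
--         cves = [
--             word
--             for line in vuln_lines
--             for word in line.split()
--             if word.startswith("CVE-")
--         ]
--         cve_counter = Counter(cves)
--         counted_cves = sorted(
--             [
--                 f"{cve} (×{count})" if count > 1 else cve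
--                 for cve, count in cve_counter.items()
--             ]
--         )
--         vuln_block = "[Vulnerabilities]\n" + "\n".join(counted_cves + vuln_lines)
--         sections.append(vuln_block)
--
--     return "\n\n".join(sections).strip() if sections else "\n".join(unique_lines)
-- ===== SOURCE B (Python) =====
-- # One-pass re-implementation: classify each unique line into section buckets
-- # (TLS lines, per-key cert buckets, ftp/ssh/http/vuln lists, a CVE Counter and
-- # presence flags) in a single scan, then assemble the sections from the buckets.
-- from collections import Counter
--
-- _CERT_KEYS = [
--     "Subject:",
--     "Subject Alternative Name",
--     "Issuer:",
--     "Public Key",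
--     "Signature Algorithm",
--     "Not valid",
--     "MD5:",
--     "SHA-1:",
-- ]
--
-- def format_script_output(raw: str) -> str:
--     raw = raw.strip()
--     if raw == "-" or not raw:
--         return "-"
--
--     unique_lines = list(dict.fromkeys(
--         line.strip()
--         for line in raw.splitlines()
--         if line.strip() and line.strip() != "-"
--     ))
--
--     has_tls = has_cert = has_http = False
--     tls_lines = []
--     cert_buckets = [[] for _ in _CERT_KEYS]
--     ftp, ssh, http, vuln = [], [], [], []
--     cve_counter = Counter()
--
--     for line in unique_lines:
--         if "TLSv1." in line:           # "TLSv1.3" always contains "TLSv1."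
--             has_tls = True
--             tls_lines.append("\n" + line.strip().strip(":"))
--         elif "TLS_" in line:           # "TLS_AKE_" always contains "TLS_"
--             tls_lines.append("- " + line.strip())
--         if "Subject:" in line or "Valid:" in line:
--             has_cert = True
--         for i, key in enumerate(_CERT_KEYS):
--             if key in line:
--                 cert_buckets[i].append(line)
--         if "FTP" in line:              # subsumes "Anonymous FTP login allowed"
--             ftp.append(line)
--         if "SSH" in line:
--             ssh.append(line)
--         if "/nice ports" in line or "FourOhFourRequest" in line:
--             has_http = True
--         if "Request" in line or "OPTIONS" in line:   # "FourOhFourRequest" contains "Request"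
--             http.append("- " + line)
--         if "CVE-" in line or "vulnerab" in line.lower():
--             vuln.append(line)
--             cve_counter.update(w for w in line.split() if w.startswith("CVE-"))
--
--     sections = []
--     if has_tls:   # a "TLSv1." line itself lands in tls_lines, so it is non-empty
--         sections.append("[TLS Cipher Support]\n" + "\n".join(tls_lines))
--     if has_cert:
--         sections.append("\n".join(["[Cert Info]"] + [l for b in cert_buckets for l in b]))
--     if ftp:
--         sections.append("\n".join(["[FTP Info]"] + ftp))
--     if ssh:
--         sections.append("\n".join(["[SSH Info]"] + ssh))
--     if has_http:
--         sections.append("\n".join(["[HTTP Response Patterns]"] + http))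
--     if vuln:
--         counted = sorted(
--             f"{cve} (×{count})" if count > 1 else cve
--             for cve, count in cve_counter.items()
--         )
--         sections.append("[Vulnerabilities]\n" + "\n".join(counted + vuln))
--
--     return "\n\n".join(sections).strip() if sections else "\n".join(unique_lines)
-- ===== Notes on version B (the rewrite author's own statement) =====
-- stated objective: alternative
-- what changed: Replaces A's six independent scans of unique_lines (one any()+filter pass per section, plus a key-major cert re-scan and a separate CVE extraction) with a single classifying pass that fills per-section buckets (per-key cert sub-buckets, ftp/ssh/http/vuln lists, TLS lines, a CVE Counter and presence flags), assembling the sections from the buckets afterwards; redundant substring tests (e.g. 'TLSv1.3' vs 'TLSv1.', 'Request' vs 'FourOhFourRequest') are dropped as subsumed.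
import Mathlib
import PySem

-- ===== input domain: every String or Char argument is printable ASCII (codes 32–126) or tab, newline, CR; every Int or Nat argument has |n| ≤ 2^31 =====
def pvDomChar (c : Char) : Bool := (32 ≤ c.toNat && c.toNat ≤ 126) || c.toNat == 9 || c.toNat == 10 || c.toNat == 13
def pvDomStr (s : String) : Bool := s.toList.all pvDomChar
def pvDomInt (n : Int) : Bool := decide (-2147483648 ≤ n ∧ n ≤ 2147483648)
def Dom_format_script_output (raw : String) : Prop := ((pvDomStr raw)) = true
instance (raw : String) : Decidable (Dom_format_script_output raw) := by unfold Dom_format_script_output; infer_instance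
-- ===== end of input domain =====

-- B re-implements the formatter as ONE classifying pass over unique_lines into
-- per-section buckets plus presence flags, assembled afterwards (objective:
-- alternative decomposition, same cost).

-- ===== PORT A =====
def fsoUnique (raw : String) : List String :=
  PySem.List.dedup
    (((PySem.Str.splitlines raw).map PySem.Str.strip).filter
      (fun l => !(l == "") && !(l == "-")))

def fsoCertKeys : List String :=
  ["Subject:", "Subject Alternative Name", "Issuer:", "Public Key",
   "Signature Algorithm", "Not valid", "MD5:", "SHA-1:"]

def fsoCveFmt (p : String × Int) : String :=
  if p.2 > 1 then p.1 ++ " (×" ++ PySem.Int.toStr p.2 ++ ")" else p.1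

def fsoTlsStepA (st : List String × String) (line : String) : List String × String :=
  if PySem.Str.isIn "TLSv1." line || PySem.Str.isIn "TLSv1.3" line then
    let cv := PySem.Str.stripChars (PySem.Str.strip line) ":"
    (st.1 ++ ["\n" ++ cv], cv)
  else if PySem.Str.isIn "TLS_" line || PySem.Str.isIn "TLS_AKE_" line then
    (st.1 ++ ["- " ++ PySem.Str.strip line], st.2)
  else st

def format_script_output (raw : String) : String :=
  let raw := PySem.Str.strip raw
  if raw == "-" || raw == "" then "-"
  else
    let unique_lines := fsoUnique raw
    let sections : List String := []
    let sections :=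
      if unique_lines.any (fun l => PySem.Str.isIn "TLSv1." l || PySem.Str.isIn "TLSv1.3" l) then
        let tls := unique_lines.foldl fsoTlsStepA ([], "")
        if !(tls.1 == []) then sections ++ ["[TLS Cipher Support]\n" ++ PySem.Str.join "\n" tls.1]
        else sections
      else sections
    let sections :=
      if unique_lines.any (fun l => PySem.Str.isIn "Subject:" l || PySem.Str.isIn "Valid:" l) then
        let cert_block := fsoCertKeys.foldl
          (fun acc key => acc ++ unique_lines.filter (fun l => PySem.Str.isIn key l))
          ["[Cert Info]"]
        sections ++ [PySem.Str.join "\n" cert_block]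
      else sections
    let sections :=
      if unique_lines.any (fun l => PySem.Str.isIn "FTP" l || PySem.Str.isIn "Anonymous FTP login allowed" l) then
        sections ++ [PySem.Str.join "\n" ("[FTP Info]" :: unique_lines.filter (fun l => PySem.Str.isIn "FTP" l))]
      else sections
    let sections :=
      if unique_lines.any (fun l => PySem.Str.isIn "SSH" l) then
        sections ++ [PySem.Str.join "\n" ("[SSH Info]" :: unique_lines.filter (fun l => PySem.Str.isIn "SSH" l))]
      else sections
    let sections :=
      if unique_lines.any (fun l => PySem.Str.isIn "/nice ports" l || PySem.Str.isIn "FourOhFourRequest" l) then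
        sections ++ [PySem.Str.join "\n" ("[HTTP Response Patterns]" ::
          (unique_lines.filter (fun l =>
            ["FourOhFourRequest", "Request", "OPTIONS"].any (fun k => PySem.Str.isIn k l))).map
            (fun l => "- " ++ l))]
      else sections
    let sections :=
      if unique_lines.any (fun l => PySem.Str.isIn "CVE-" l || PySem.Str.isIn "vulnerab" (PySem.Str.lower l)) then
        let vuln_lines := unique_lines.filter
          (fun l => PySem.Str.isIn "CVE-" l || PySem.Str.isIn "vulnerab" (PySem.Str.lower l))
        let cves := vuln_lines.flatMap
          (fun l => (PySem.Str.split₀ l).filter (fun w => PySem.Str.startswith w "CVE-"))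
        let counted := PySem.List.sorted
          ((PySem.Dict.counter cves).items.map fsoCveFmt) (fun x => x) false
        sections ++ ["[Vulnerabilities]\n" ++ PySem.Str.join "\n" (counted ++ vuln_lines)]
      else sections
    if sections == [] then PySem.Str.join "\n" unique_lines
    else PySem.Str.strip (PySem.Str.join "\n\n" sections)

-- ===== PORT B =====
structure FsoAcc where
  hasTls : Bool
  tls : List String
  hasCert : Bool
  certs : List (List String)
  ftp : List String
  ssh : List String
  hasHttp : Bool
  http : List String
  vuln : List String
  cnt : PySem.Dict String Int

def fsoInit : FsoAcc :=
  { hasTls := false, tls := [], hasCert := false,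
    certs := fsoCertKeys.map (fun _ => []),
    ftp := [], ssh := [], hasHttp := false, http := [], vuln := [],
    cnt := PySem.Dict.empty }

def fsoStep (st : FsoAcc) (line : String) : FsoAcc :=
  let vulnHit := PySem.Str.isIn "CVE-" line || PySem.Str.isIn "vulnerab" (PySem.Str.lower line)
  { hasTls := st.hasTls || PySem.Str.isIn "TLSv1." line
    tls :=
      if PySem.Str.isIn "TLSv1." line then
        st.tls ++ ["\n" ++ PySem.Str.stripChars (PySem.Str.strip line) ":"]
      else if PySem.Str.isIn "TLS_" line then st.tls ++ ["- " ++ PySem.Str.strip line]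
      else st.tls
    hasCert := st.hasCert || (PySem.Str.isIn "Subject:" line || PySem.Str.isIn "Valid:" line)
    certs := (fsoCertKeys.zip st.certs).map
      (fun kb => if PySem.Str.isIn kb.1 line then kb.2 ++ [line] else kb.2)
    ftp := if PySem.Str.isIn "FTP" line then st.ftp ++ [line] else st.ftp
    ssh := if PySem.Str.isIn "SSH" line then st.ssh ++ [line] else st.ssh
    hasHttp := st.hasHttp || (PySem.Str.isIn "/nice ports" line || PySem.Str.isIn "FourOhFourRequest" line)
    http := if PySem.Str.isIn "Request" line || PySem.Str.isIn "OPTIONS" line then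
        st.http ++ ["- " ++ line]
      else st.http
    vuln := if vulnHit then st.vuln ++ [line] else st.vuln
    cnt := if vulnHit then
        ((PySem.Str.split₀ line).filter (fun w => PySem.Str.startswith w "CVE-")).foldl
          (fun d w => d.modify w 0 (· + 1)) st.cnt
      else st.cnt }

def format_script_output_alt (raw : String) : String :=
  let raw := PySem.Str.strip raw
  if raw == "-" || raw == "" then "-"
  else
    let unique_lines := fsoUnique raw
    let st := unique_lines.foldl fsoStep fsoInit
    let sections : List String :=
      (if st.hasTls then ["[TLS Cipher Support]\n" ++ PySem.Str.join "\n" st.tls] else []) ++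
      (if st.hasCert then [PySem.Str.join "\n" ("[Cert Info]" :: st.certs.flatten)] else []) ++
      (if !st.ftp.isEmpty then [PySem.Str.join "\n" ("[FTP Info]" :: st.ftp)] else []) ++
      (if !st.ssh.isEmpty then [PySem.Str.join "\n" ("[SSH Info]" :: st.ssh)] else []) ++
      (if st.hasHttp then [PySem.Str.join "\n" ("[HTTP Response Patterns]" :: st.http)] else []) ++
      (if !st.vuln.isEmpty then
        let counted := PySem.List.sorted (st.cnt.items.map fsoCveFmt) (fun x => x) false
        ["[Vulnerabilities]\n" ++ PySem.Str.join "\n" (counted ++ st.vuln)]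
      else [])
    if sections == [] then PySem.Str.join "\n" unique_lines
    else PySem.Str.strip (PySem.Str.join "\n\n" sections)

-- ===== PRECONDITION & SPEC =====
def Spec_format_script_output (raw : String) (out : String) : Prop := out = format_script_output_alt raw
instance (raw : String) (out : String) : Decidable (Spec_format_script_output raw out) := by unfold Spec_format_script_output; infer_instance

-- ===== CLAIM (what is proved, stated in full; the proofs are below) =====
def Claim_equal_format_script_output : Prop := ∀ (raw : String), Dom_format_script_output raw → Spec_format_script_output raw (format_script_output raw)


-- ===== LEMMAS AND PROOFS =====

lemma fso_isIn_absorb (s t l : String) (h : s.toList <:+: t.toList) :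
    (PySem.Str.isIn s l || PySem.Str.isIn t l) = PySem.Str.isIn s l := by
  cases h2 : PySem.Str.isIn t l
  · simp
  · have ht := (PySem.Str.isIn_iff_infix t l).mp h2
    have hs := (PySem.Str.isIn_iff_infix s l).mpr (h.trans ht)
    rw [hs]
    rfl

lemma fso_isIn_absorb' (s t l : String) (h : s.toList <:+: t.toList) :
    (PySem.Str.isIn t l || PySem.Str.isIn s l) = PySem.Str.isIn s l := by
  rw [Bool.or_comm]; exact fso_isIn_absorb s t l h

lemma fso_tls_pred (l : String) :
    (PySem.Str.isIn "TLSv1." l || PySem.Str.isIn "TLSv1.3" l) = PySem.Str.isIn "TLSv1." l :=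
  fso_isIn_absorb _ _ _ (by decide)

lemma fso_tls2_pred (l : String) :
    (PySem.Str.isIn "TLS_" l || PySem.Str.isIn "TLS_AKE_" l) = PySem.Str.isIn "TLS_" l :=
  fso_isIn_absorb _ _ _ (by decide)

lemma fso_ftp_pred (l : String) :
    (PySem.Str.isIn "FTP" l || PySem.Str.isIn "Anonymous FTP login allowed" l) = PySem.Str.isIn "FTP" l :=
  fso_isIn_absorb _ _ _ (by decide)

lemma fso_http_pred (l : String) :
    (PySem.Str.isIn "FourOhFourRequest" l || (PySem.Str.isIn "Request" l || PySem.Str.isIn "OPTIONS" l))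
      = (PySem.Str.isIn "Request" l || PySem.Str.isIn "OPTIONS" l) := by
  rw [← Bool.or_assoc, fso_isIn_absorb' _ _ _ (by decide)]

lemma fso_any_filter {α : Type} (p : α → Bool) (u : List α) :
    u.any p = !(u.filter p).isEmpty := by
  induction u with
  | nil => rfl
  | cons x xs ih => by_cases h : p x <;> simp [h, ih]

lemma fso_ftp_fold (u : List String) (st : FsoAcc) :
    (u.foldl fsoStep st).ftp = st.ftp ++ u.filter (fun l => PySem.Str.isIn "FTP" l) := by
  induction u generalizing st with
  | nil => simp
  | cons x xs ih =>
    rw [List.foldl_cons, ih]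
    simp only [fsoStep, List.filter_cons]
    split_ifs with h <;> simp

lemma fso_ssh_fold (u : List String) (st : FsoAcc) :
    (u.foldl fsoStep st).ssh = st.ssh ++ u.filter (fun l => PySem.Str.isIn "SSH" l) := by
  induction u generalizing st with
  | nil => simp
  | cons x xs ih =>
    rw [List.foldl_cons, ih]
    simp only [fsoStep, List.filter_cons]
    split_ifs with h <;> simp

lemma fso_vuln_fold (u : List String) (st : FsoAcc) :
    (u.foldl fsoStep st).vuln = st.vuln ++
      u.filter (fun l => PySem.Str.isIn "CVE-" l || PySem.Str.isIn "vulnerab" (PySem.Str.lower l)) := by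
  induction u generalizing st with
  | nil => simp
  | cons x xs ih =>
    rw [List.foldl_cons, ih]
    simp only [fsoStep, List.filter_cons]
    split_ifs with h <;> simp

lemma fso_http_fold (u : List String) (st : FsoAcc) :
    (u.foldl fsoStep st).http = st.http ++
      (u.filter (fun l => PySem.Str.isIn "Request" l || PySem.Str.isIn "OPTIONS" l)).map
        (fun l => "- " ++ l) := by
  induction u generalizing st with
  | nil => simp
  | cons x xs ih =>
    rw [List.foldl_cons, ih]
    simp only [fsoStep, List.filter_cons]
    split_ifs with h <;> simp

lemma fso_hasTls_fold (u : List String) (st : FsoAcc) :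
    (u.foldl fsoStep st).hasTls = (st.hasTls || u.any (fun l => PySem.Str.isIn "TLSv1." l)) := by
  induction u generalizing st with
  | nil => simp
  | cons x xs ih => rw [List.foldl_cons, ih]; simp [fsoStep, Bool.or_assoc]

lemma fso_hasCert_fold (u : List String) (st : FsoAcc) :
    (u.foldl fsoStep st).hasCert =
      (st.hasCert || u.any (fun l => PySem.Str.isIn "Subject:" l || PySem.Str.isIn "Valid:" l)) := by
  induction u generalizing st with
  | nil => simp
  | cons x xs ih => rw [List.foldl_cons, ih]; simp [fsoStep, Bool.or_assoc]

lemma fso_hasHttp_fold (u : List String) (st : FsoAcc) :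
    (u.foldl fsoStep st).hasHttp =
      (st.hasHttp || u.any (fun l => PySem.Str.isIn "/nice ports" l || PySem.Str.isIn "FourOhFourRequest" l)) := by
  induction u generalizing st with
  | nil => simp
  | cons x xs ih => rw [List.foldl_cons, ih]; simp [fsoStep, Bool.or_assoc]

def fsoTlsItem (line : String) : List String :=
  if PySem.Str.isIn "TLSv1." line then
    ["\n" ++ PySem.Str.stripChars (PySem.Str.strip line) ":"]
  else if PySem.Str.isIn "TLS_" line then ["- " ++ PySem.Str.strip line]
  else []

lemma fso_tls_fold (u : List String) (st : FsoAcc) :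
    (u.foldl fsoStep st).tls = st.tls ++ u.flatMap fsoTlsItem := by
  induction u generalizing st with
  | nil => simp
  | cons x xs ih =>
    rw [List.foldl_cons, ih]
    simp only [fsoStep, List.flatMap_cons, fsoTlsItem]
    cases hq1 : PySem.Str.isIn "TLSv1." x <;> cases hq2 : PySem.Str.isIn "TLS_" x <;>
      simp [*]

lemma fso_tls_ne (u : List String) (h : u.any (fun l => PySem.Str.isIn "TLSv1." l) = true) :
    u.flatMap fsoTlsItem ≠ [] := by
  intro hnil
  obtain ⟨x, hx, hpx⟩ := List.any_eq_true.mp h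
  have := List.flatMap_eq_nil_iff.mp hnil x hx
  simp only [fsoTlsItem, hpx, reduceIte] at this
  simp at this

lemma fso_tlsA_fold (u : List String) (l : List String) (c : String) :
    (u.foldl fsoTlsStepA (l, c)).1 = l ++ u.flatMap fsoTlsItem := by
  induction u generalizing l c with
  | nil => simp
  | cons x xs ih =>
    rw [List.foldl_cons]
    rw [show (fsoTlsStepA (l, c) x) = (l ++ fsoTlsItem x,
        if PySem.Str.isIn "TLSv1." x then PySem.Str.stripChars (PySem.Str.strip x) ":" else c) from ?_,
      ih, List.flatMap_cons, List.append_assoc]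
    simp only [fsoTlsStepA, fso_tls_pred, fso_tls2_pred, fsoTlsItem]
    cases hq1 : PySem.Str.isIn "TLSv1." x <;> cases hq2 : PySem.Str.isIn "TLS_" x <;>
      simp [*]

lemma fso_certs_fold (u : List String) : ∀ (st : FsoAcc) (f : String → List String),
    st.certs = fsoCertKeys.map f →
    (u.foldl fsoStep st).certs =
      fsoCertKeys.map (fun k => f k ++ u.filter (fun l => PySem.Str.isIn k l)) := by
  induction u with
  | nil => intro st f h; simpa using h
  | cons x xs ih =>
    intro st f h
    rw [List.foldl_cons,
      ih (fsoStep st x) (fun k => if PySem.Str.isIn k x then f k ++ [x] else f k) ?side]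
    · apply List.map_congr_left; intro k _
      simp only [List.filter_cons]
      split_ifs with hk <;> simp
    case side =>
      have hz : fsoCertKeys.zip (fsoCertKeys.map f) = fsoCertKeys.map (fun k => (k, f k)) := by
        conv_lhs => rw [← List.map_id fsoCertKeys]
        exact List.zip_map'
      simp [fsoStep, h, hz, List.map_map, Function.comp_def]

lemma fso_cnt_fold (u : List String) (st : FsoAcc) :
    (u.foldl fsoStep st).cnt =
      ((u.filter (fun l => PySem.Str.isIn "CVE-" l || PySem.Str.isIn "vulnerab" (PySem.Str.lower l))).flatMap
        (fun l => (PySem.Str.split₀ l).filter (fun w => PySem.Str.startswith w "CVE-"))).foldl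
        (fun d w => d.modify w 0 (· + 1)) st.cnt := by
  induction u generalizing st with
  | nil => simp
  | cons x xs ih =>
    rw [List.foldl_cons, ih]
    simp only [fsoStep, List.filter_cons]
    split_ifs with h <;> simp [List.foldl_append]


-- ===== VERDICT (by name: the statement is the Claim_ definition above) =====
theorem format_script_output_spec : Claim_equal_format_script_output := by
  intro raw _
  unfold Spec_format_script_output format_script_output format_script_output_alt
  cases h0 : (PySem.Str.strip raw == "-" || PySem.Str.strip raw == "") with
  | true => simp [h0]
  | false =>
    simp only [h0, Bool.false_eq_true, if_false]
    generalize fsoUnique (PySem.Str.strip raw) = u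
    have htls : (List.foldl fsoStep fsoInit u).tls = u.flatMap fsoTlsItem := by
      rw [fso_tls_fold]; simp [fsoInit]
    have hhastls : (List.foldl fsoStep fsoInit u).hasTls
        = u.any (fun l => PySem.Str.isIn "TLSv1." l) := by
      rw [fso_hasTls_fold]; simp [fsoInit]
    have hhascert : (List.foldl fsoStep fsoInit u).hasCert
        = u.any (fun l => PySem.Str.isIn "Subject:" l || PySem.Str.isIn "Valid:" l) := by
      rw [fso_hasCert_fold]; simp [fsoInit]
    have hhashttp : (List.foldl fsoStep fsoInit u).hasHttp
        = u.any (fun l => PySem.Str.isIn "/nice ports" l || PySem.Str.isIn "FourOhFourRequest" l) := by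
      rw [fso_hasHttp_fold]; simp [fsoInit]
    have hcerts : (List.foldl fsoStep fsoInit u).certs
        = fsoCertKeys.map (fun k => u.filter (fun l => PySem.Str.isIn k l)) := by
      rw [fso_certs_fold u fsoInit (fun _ => []) rfl]; simp
    have hftp : (List.foldl fsoStep fsoInit u).ftp
        = u.filter (fun l => PySem.Str.isIn "FTP" l) := by
      rw [fso_ftp_fold]; simp [fsoInit]
    have hssh : (List.foldl fsoStep fsoInit u).ssh
        = u.filter (fun l => PySem.Str.isIn "SSH" l) := by
      rw [fso_ssh_fold]; simp [fsoInit]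
    have hhttp : (List.foldl fsoStep fsoInit u).http
        = (u.filter (fun l => PySem.Str.isIn "Request" l || PySem.Str.isIn "OPTIONS" l)).map
            (fun l => "- " ++ l) := by
      rw [fso_http_fold]; simp [fsoInit]
    have hvuln : (List.foldl fsoStep fsoInit u).vuln
        = u.filter (fun l => PySem.Str.isIn "CVE-" l || PySem.Str.isIn "vulnerab" (PySem.Str.lower l)) := by
      rw [fso_vuln_fold]; simp [fsoInit]
    have hcnt : (List.foldl fsoStep fsoInit u).cnt
        = PySem.Dict.counter
            ((u.filter (fun l => PySem.Str.isIn "CVE-" l || PySem.Str.isIn "vulnerab" (PySem.Str.lower l))).flatMap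
              (fun l => (PySem.Str.split₀ l).filter (fun w => PySem.Str.startswith w "CVE-"))) := by
      rw [fso_cnt_fold, show fsoInit.cnt = PySem.Dict.empty from rfl]
      exact (PySem.Dict.counter_eq_foldl _).symm
    rw [htls, hhastls, hhascert, hhashttp, hcerts, hftp, hssh, hhttp, hvuln, hcnt]
    rw [fso_tlsA_fold u [] ""]
    rw [PySem.List.foldl_append_eq_flatMap]
    simp only [fso_tls_pred, fso_ftp_pred, fso_http_pred, List.any_cons, List.any_nil,
      Bool.or_false, ← fso_any_filter]
    cases hc1 : u.any (fun l => PySem.Str.isIn "TLSv1." l) with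
    | true =>
      have hne : (u.flatMap fsoTlsItem == []) = false := by
        simp [fso_tls_ne u hc1]
      have hall : ¬ ∀ a ∈ u, fsoTlsItem a = [] := by
        rw [← List.flatMap_eq_nil_iff]; exact fso_tls_ne u hc1
      have hex : ∃ x ∈ u, ¬ fsoTlsItem x = [] := by
        simpa [not_forall] using hall
      cases hc2 : u.any (fun l => PySem.Str.isIn "Subject:" l || PySem.Str.isIn "Valid:" l) <;>
      cases hc3 : u.any (fun l => PySem.Str.isIn "FTP" l) <;>
      cases hc4 : u.any (fun l => PySem.Str.isIn "SSH" l) <;>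
      cases hc5 : u.any (fun l => PySem.Str.isIn "/nice ports" l || PySem.Str.isIn "FourOhFourRequest" l) <;>
      cases hc6 : u.any (fun l => PySem.Str.isIn "CVE-" l || PySem.Str.isIn "vulnerab" (PySem.Str.lower l)) <;>
        simp [*, List.flatMap_def]
    | false =>
      cases hc2 : u.any (fun l => PySem.Str.isIn "Subject:" l || PySem.Str.isIn "Valid:" l) <;>
      cases hc3 : u.any (fun l => PySem.Str.isIn "FTP" l) <;>
      cases hc4 : u.any (fun l => PySem.Str.isIn "SSH" l) <;>
      cases hc5 : u.any (fun l => PySem.Str.isIn "/nice ports" l || PySem.Str.isIn "FourOhFourRequest" l) <;>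
      cases hc6 : u.any (fun l => PySem.Str.isIn "CVE-" l || PySem.Str.isIn "vulnerab" (PySem.Str.lower l)) <;>
        simp [List.flatMap_def]
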